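-- pv_equiv track=rewrite | github.com/bamboosingsinwind/interview | interview_code/.history/python/xiecheng0504-3_20230510233839.py | check
-- ===== SOURCE A (Python) =====
-- def check(str):
--     n = len(str)
--
--     if n<3: return True
--
--     for i in range(n-1):
--         if str[i] == str[i+1] and str[i]!='?':
--             return False
--
--     for i in range(len(str)-2):
--         cnt = str[i:i+3].count('1')
--         if cnt % 2: return False   # odd counts are not minimal strings
--     return True
-- ===== SOURCE B (Python) =====
-- def check(str):
--     # One pass with a sliding window: track the previous two characters and a
--     # running count of '1's in the current 3-window; no slicing/count per index.
--     if len(str) < 3: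
--         return True
--     if str[0] == str[1] and str[0] != '?':
--         return False
--     pp, prev = str[0], str[1]
--     ones = (pp == '1') + (prev == '1')
--     for c in str[2:]:
--         if prev == c and prev != '?':
--             return False
--         ones += (c == '1')
--         if ones % 2:
--             return False
--         ones -= (pp == '1')
--         pp, prev = prev, c
--     return True
-- ===== Notes on version B (the rewrite author's own statement) =====
-- stated objective: alternative
-- what changed: Replaces A's two index loops (a pairwise scan plus a per-index slice-and-count of every 3-window) with a single sliding-window pass that maintains a running count of '1's and checks adjacency and window parity together.
import Mathlib
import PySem

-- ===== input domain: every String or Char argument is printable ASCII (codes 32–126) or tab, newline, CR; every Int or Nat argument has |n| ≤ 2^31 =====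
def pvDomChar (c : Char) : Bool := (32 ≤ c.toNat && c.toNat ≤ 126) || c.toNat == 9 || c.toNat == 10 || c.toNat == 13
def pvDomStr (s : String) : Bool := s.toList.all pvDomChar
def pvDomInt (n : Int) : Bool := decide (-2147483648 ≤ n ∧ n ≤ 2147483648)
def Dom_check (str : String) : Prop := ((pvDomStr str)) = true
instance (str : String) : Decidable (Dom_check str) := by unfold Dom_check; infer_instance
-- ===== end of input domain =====

-- B replaces A's per-index slice-and-count window loop by one sliding-window pass
-- maintaining a running count of '1's, checking adjacency and parity together.

-- ===== PORT A =====
-- literal port of A: early-return loops become `.any` over the same index ranges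
def check (str : String) : Bool :=
  let cs := str.toList
  let n := cs.length
  if n < 3 then true
  else if (PySem.List.pyRange 0 ((n : Int) - 1)).any (fun i =>
      PySem.List.pyGetD cs i ' ' == PySem.List.pyGetD cs (i + 1) ' ' &&
      PySem.List.pyGetD cs i ' ' != '?') then false
  else if (PySem.List.pyRange 0 ((n : Int) - 2)).any (fun i =>
      (PySem.List.slice cs (some i) (some (i + 3))).count '1' % 2 == 1) then false
  else true

-- ===== PORT B =====
def checkOne (c : Char) : Int := if c == '1' then 1 else 0

def checkAltLoop (pp prev : Char) (ones : Int) : List Char → Bool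
  | [] => true
  | c :: rest =>
    if prev == c && prev != '?' then false
    else
      let ones' := ones + checkOne c
      if ones' % 2 == 1 then false
      else checkAltLoop prev c (ones' - checkOne pp) rest

def check_alt (str : String) : Bool :=
  match str.toList with
  | a :: b :: c :: rest =>
    if a == b && a != '?' then false
    else checkAltLoop a b (checkOne a + checkOne b) (c :: rest)
  | _ => true

-- ===== PRECONDITION & SPEC =====
def Spec_check (str : String) (out : Bool) : Prop := out = check_alt str
instance (str : String) (out : Bool) : Decidable (Spec_check str out) := by unfold Spec_check; infer_instance

-- ===== CLAIM (what is proved, stated in full; the proofs are below) =====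
def Claim_equal_check : Prop := ∀ (str : String), Dom_check str → Spec_check str (check str)

-- ===== LEMMAS AND PROOFS =====

-- no-adjacent-equal-non-'?' characters, as a structural recursion
def adjOK : List Char → Bool
  | a :: b :: t => !(a == b && a != '?') && adjOK (b :: t)
  | _ => true

-- every 3-window has an even number of '1's, as a structural recursion
def winOK : List Char → Bool
  | a :: b :: c :: t => !((checkOne a + checkOne b + checkOne c) % 2 == 1) && winOK (b :: c :: t)
  | _ => true

lemma any_range_adj (cs : List Char) :
    (List.range (cs.length - 1)).any
      (fun k => cs.getD k ' ' == cs.getD (k + 1) ' ' && cs.getD k ' ' != '?')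
      = !adjOK cs := by
  induction cs with
  | nil => simp [adjOK]
  | cons a t ih =>
    cases t with
    | nil => simp [adjOK]
    | cons b t' =>
      have hlen : (a :: b :: t').length - 1 = (b :: t').length - 1 + 1 := by
        simp [List.length_cons]
      rw [hlen, List.range_succ_eq_map]
      simp only [List.any_cons, List.any_map, Function.comp_def, Nat.succ_eq_add_one,
        List.getD_cons_succ, List.getD_cons_zero]
      simp only [List.getD_cons_succ] at ih
      rw [ih]
      cases h : adjOK (b :: t') <;> simp [adjOK, h]

lemma any_range_win (cs : List Char) :
    (List.range (cs.length - 2)).any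
      (fun k => (List.take 3 (List.drop k cs)).count '1' % 2 == 1)
      = !winOK cs := by
  induction cs with
  | nil => simp [winOK]
  | cons a t ih =>
    match t with
    | [] => simp [winOK]
    | [b] => simp [winOK]
    | b :: c :: t' =>
      have hlen : (a :: b :: c :: t').length - 2 = (b :: c :: t').length - 2 + 1 := by
        simp [List.length_cons]
      rw [hlen, List.range_succ_eq_map]
      simp only [List.any_cons, List.any_map, Function.comp_def, Nat.succ_eq_add_one,
        List.drop_succ_cons, List.drop_zero]
      rw [ih]
      have hw : winOK (a :: b :: c :: t')
          = (!((checkOne a + checkOne b + checkOne c) % 2 == 1) && winOK (b :: c :: t')) := rfl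
      rw [hw]
      have hcnt : ((List.take 3 (a :: b :: c :: t')).count '1' % 2 == 1)
          = ((checkOne a + checkOne b + checkOne c) % 2 == 1) := by
        simp only [List.take_succ_cons, List.take_zero, List.count_cons, List.count_nil, checkOne]
        by_cases ha : a == '1' <;> by_cases hb : b == '1' <;> by_cases hc : c == '1' <;>
          simp [ha, hb, hc] <;> decide
      rw [hcnt]
      cases h1 : ((checkOne a + checkOne b + checkOne c) % 2 == 1) <;>
        cases h2 : winOK (b :: c :: t') <;> simp [h1, h2]

lemma altLoop_eq (rest : List Char) : forall (pp prev : Char),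
    checkAltLoop pp prev (checkOne pp + checkOne prev) rest
      = (adjOK (prev :: rest) && winOK (pp :: prev :: rest)) := by
  induction rest with
  | nil => intro pp prev; simp [checkAltLoop, adjOK, winOK]
  | cons c rest' ih =>
    intro pp prev
    have harith : checkOne pp + checkOne prev + checkOne c - checkOne pp
        = checkOne prev + checkOne c := by ring
    simp only [checkAltLoop, harith]
    rw [ih prev c]
    have hadj : adjOK (prev :: c :: rest') = (!(prev == c && prev != '?') && adjOK (c :: rest')) := rfl
    have hwin : winOK (pp :: prev :: c :: rest')
        = (!((checkOne pp + checkOne prev + checkOne c) % 2 == 1) && winOK (prev :: c :: rest')) := rfl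
    rw [hadj, hwin]
    by_cases h1 : (prev == c && prev != '?') = true <;>
      by_cases h2 : ((checkOne pp + checkOne prev + checkOne c) % 2 == 1) = true <;>
        cases hA : adjOK (c :: rest') <;> cases hW : winOK (prev :: c :: rest') <;>
          simp [h1, h2, hA, hW]

-- ===== VERDICT (by name: the statement is the Claim_ definition above) =====
theorem check_spec : Claim_equal_check := by
  intro str _
  unfold Spec_check check check_alt
  rcases str.toList with _ | ⟨a, _ | ⟨b, _ | ⟨c, t⟩⟩⟩
  · simp
  · simp
  · simp
  · have hn3 : ¬ ((a :: b :: c :: t).length < 3) := by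
      simp only [List.length_cons]; omega
    simp only [hn3, if_false]
    have e1 : (((a :: b :: c :: t).length : Int) - 1)
        = (((a :: b :: c :: t).length - 1 : Nat) : Int) := by
      simp only [List.length_cons]; push_cast; omega
    have e2 : (((a :: b :: c :: t).length : Int) - 2)
        = (((a :: b :: c :: t).length - 2 : Nat) : Int) := by
      simp only [List.length_cons]; push_cast; omega
    rw [e1, e2, PySem.List.pyRange_zero_natCast, PySem.List.pyRange_zero_natCast]
    simp only [List.any_map, Function.comp_def]
    have c1 : ∀ k : Nat, ((k : Int) + 1) = (((k + 1 : Nat)) : Int) := by intro k; push_cast; ring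
    have c3 : ∀ k : Nat, ((k : Int) + 3) = ((k : Int) + ((3 : Nat) : Int)) := by
      intro k; norm_num
    simp only [c1, c3, PySem.List.pyGetD_natCast, PySem.List.slice_natCast_add]
    rw [any_range_adj (a :: b :: c :: t), any_range_win (a :: b :: c :: t),
      altLoop_eq (c :: t) a b]
    have hadj : adjOK (a :: b :: c :: t) = (!(a == b && a != '?') && adjOK (b :: c :: t)) := rfl
    rw [hadj]
    cases h1 : (a == b && a != '?') <;> cases h2 : adjOK (b :: c :: t) <;>
      cases h3 : winOK (a :: b :: c :: t) <;> simp [h1, h2, h3]
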